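-- pv_equiv track=rewrite | github.com/dashingDragon/mp-tp | dmi20_02.py | avancer_debut_bloque
-- ===== SOURCE A (Python) =====
-- def avancer_debut_bloque(L, b, m):
--     R = L[:]
--     for i in range(m - 1, 0, -1):
--         if not R[i]:
--             if R[i - 1]:
--                 R[i] = True
--                 R[i - 1] = False
--     R[0] = b
--     return R
-- ===== SOURCE B (Python) =====
-- def avancer_debut_bloque(L, b, m):
--     n = len(L)
--     k = max(0, min(m, n))
--     # advance table: adv[j] == True iff the True at position j shifts one cell right
--     adv = [False] * n
--     for j in range(k - 2, -1, -1):
--         adv[j] = L[j] and (not L[j + 1] or adv[j + 1])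
--     # forward construction pass, no mutation of L
--     out = []
--     for i in range(n):
--         if i == 0:
--             out.append(b)
--         elif adv[i - 1]:
--             out.append(True)
--         elif adv[i]:
--             out.append(False)
--         else:
--             out.append(L[i])
--     return out
-- ===== Notes on version B (the rewrite author's own statement) =====
-- stated objective: alternative
-- what changed: Replaces A's in-place right-to-left cascading swap over a mutated copy with a precomputed 'advance' flag table (built by structural recursion on the prefix) plus a single forward construction pass that never mutates.
import Mathlib
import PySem

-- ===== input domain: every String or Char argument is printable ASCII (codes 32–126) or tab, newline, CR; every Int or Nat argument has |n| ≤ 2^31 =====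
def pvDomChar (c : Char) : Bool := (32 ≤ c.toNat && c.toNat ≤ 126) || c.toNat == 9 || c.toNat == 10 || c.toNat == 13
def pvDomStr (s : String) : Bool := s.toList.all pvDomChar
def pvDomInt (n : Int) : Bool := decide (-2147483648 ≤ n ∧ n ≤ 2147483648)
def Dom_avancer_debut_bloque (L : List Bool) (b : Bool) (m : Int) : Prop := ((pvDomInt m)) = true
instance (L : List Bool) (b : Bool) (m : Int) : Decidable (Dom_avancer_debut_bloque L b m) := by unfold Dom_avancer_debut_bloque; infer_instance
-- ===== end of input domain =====

-- B replaces A's in-place right-to-left cascading swap with a precomputed 'advance'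
-- flag table plus a separate forward construction pass (objective: alternative).

-- ===== PORT A =====
def avancer_debut_bloque (L : List Bool) (b : Bool) (m : Int) : List Bool :=
  let R := (PySem.List.pyRange (m - 1) 0 (-1)).foldl (fun R i =>
    if !(PySem.List.pyGetD R i false) then
      if PySem.List.pyGetD R (i - 1) false then
        PySem.List.pySetD (PySem.List.pySetD R i true) (i - 1) false
      else R
    else R) L
  match R with
  | [] => []            -- Python raises IndexError at R[0] = b here; excluded by Pre_
  | _ :: t => b :: t    -- R[0] = b

-- ===== PORT B =====
def avancer_debut_bloque_alt (L : List Bool) (b : Bool) (m : Int) : List Bool :=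
  let n : Int := PySem.List.len L
  let k : Int := max 0 (min m n)
  let adv := (PySem.List.pyRange (k - 2) (-1) (-1)).foldl (fun adv j =>
      PySem.List.pySetD adv j
        (PySem.List.pyGetD L j false &&
          (!(PySem.List.pyGetD L (j + 1) false) || PySem.List.pyGetD adv (j + 1) false)))
    (List.replicate n.toNat false)
  (PySem.List.pyRange 0 n 1).foldl (fun out i =>
    out ++ [if i = 0 then b
            else if PySem.List.pyGetD adv (i - 1) false then true
            else if PySem.List.pyGetD adv i false then false
            else PySem.List.pyGetD L i false]) []

-- ===== PRECONDITION & SPEC =====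
-- Pre_ excludes exactly the inputs where Python A raises IndexError: empty L (R[0] = b)
-- and m > len(L) with m ≥ 2 (R[m-1] out of range).
def Pre_avancer_debut_bloque (L : List Bool) (b : Bool) (m : Int) : Prop :=
  L ≠ [] ∧ m ≤ PySem.List.len L
instance (L : List Bool) (b : Bool) (m : Int) : Decidable (Pre_avancer_debut_bloque L b m) := by unfold Pre_avancer_debut_bloque; infer_instance

def pvWitness_avancer_debut_bloque : List Bool × Bool × Int := ([true, false], true, 2)

def Spec_avancer_debut_bloque (L : List Bool) (b : Bool) (m : Int) (out : List Bool) : Prop := out = avancer_debut_bloque_alt L b m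
instance (L : List Bool) (b : Bool) (m : Int) (out : List Bool) : Decidable (Spec_avancer_debut_bloque L b m out) := by unfold Spec_avancer_debut_bloque; infer_instance

-- ===== CLAIM (what is proved, stated in full; the proofs are below) =====
def Claim_equal_avancer_debut_bloque : Prop := ∀ (L : List Bool) (b : Bool) (m : Int), Dom_avancer_debut_bloque L b m → Pre_avancer_debut_bloque L b m → Spec_avancer_debut_bloque L b m (avancer_debut_bloque L b m)


-- ===== LEMMAS AND PROOFS =====

-- spec-side mirror of the advance table: advSpec P lists, for each position of P,
-- whether the True there shifts one cell right
def advSpec : List Bool → List Bool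
  | [] => []
  | [_] => [false]
  | x :: y :: t => (x && (!y || (advSpec (y :: t)).getD 0 false)) :: advSpec (y :: t)

-- the clamped block bound k as a Nat
def kf (L : List Bool) (m : Int) : Nat := (max 0 (min m (L.length : Int))).toNat

-- the advance flag at position j
def tg (L : List Bool) (m : Int) (j : Nat) : Bool := (advSpec (L.take (kf L m))).getD j false

theorem advSpec_rec (P : List Bool) (j : Nat) (h : j + 1 < P.length) :
    (advSpec P).getD j false
      = (P.getD j false && (!(P.getD (j + 1) false) || (advSpec P).getD (j + 1) false)) :=
  match P, j, h with
  | [], _, h => by simp at h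
  | [_], _, h => by simp at h
  | x :: y :: t, 0, _ => by simp [advSpec]
  | x :: y :: t, j + 1, h => by
    have ih := advSpec_rec (y :: t) j (by simp at h ⊢; omega)
    simpa [advSpec] using ih

theorem advSpec_top : ∀ (P : List Bool) (j : Nat), P.length ≤ j + 1 →
    (advSpec P).getD j false = false
  | [], j, _ => by simp [advSpec]
  | [x], j, _ => by cases j <;> simp [advSpec]
  | x :: y :: t, j, h => by
    match j with
    | 0 => simp at h
    | j + 1 =>
      have ih := advSpec_top (y :: t) j (by simp at h ⊢; omega)
      simpa [advSpec] using ih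

theorem kf_le (L : List Bool) (m : Int) : kf L m ≤ L.length := by
  unfold kf; omega

theorem tg_rec (L : List Bool) (m : Int) (j : Nat) (h : j + 1 < kf L m) :
    tg L m j = (L.getD j false && (!(L.getD (j + 1) false) || tg L m (j + 1))) := by
  have hk := kf_le L m
  have hlen : (L.take (kf L m)).length = kf L m := by simp; omega
  have hr := advSpec_rec (L.take (kf L m)) j (by omega)
  unfold tg
  rw [hr]
  have h1 : (L.take (kf L m)).getD j false = L.getD j false := by
    rw [List.getD_eq_getElem?_getD, List.getD_eq_getElem?_getD, List.getElem?_take_of_lt (by omega)]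
  have h2 : (L.take (kf L m)).getD (j + 1) false = L.getD (j + 1) false := by
    rw [List.getD_eq_getElem?_getD, List.getD_eq_getElem?_getD, List.getElem?_take_of_lt (by omega)]
  rw [h1, h2]

theorem tg_top (L : List Bool) (m : Int) (j : Nat) (h : kf L m ≤ j + 1) :
    tg L m j = false := by
  have hk := kf_le L m
  have hlen : (L.take (kf L m)).length = kf L m := by simp; omega
  exact advSpec_top _ j (by omega)

-- B's flag-table loop computes tg at every index
theorem B_loop (L : List Bool) (m : Int) :
    ∀ (c : Nat) (adv : List Bool), adv.length = L.length → c + 1 ≤ kf L m →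
    (∀ j : Nat, c ≤ j → adv.getD j false = tg L m j) →
    (((PySem.List.pyRange ((c : Int) - 1) (-1) (-1)).foldl (fun adv j =>
        PySem.List.pySetD adv j
          (PySem.List.pyGetD L j false &&
            (!(PySem.List.pyGetD L (j + 1) false) || PySem.List.pyGetD adv (j + 1) false)))
      adv).length = L.length
    ∧ ∀ j : Nat, ((PySem.List.pyRange ((c : Int) - 1) (-1) (-1)).foldl (fun adv j =>
        PySem.List.pySetD adv j
          (PySem.List.pyGetD L j false &&
            (!(PySem.List.pyGetD L (j + 1) false) || PySem.List.pyGetD adv (j + 1) false)))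
      adv).getD j false = tg L m j) := by
  intro c
  induction c with
  | zero =>
    intro adv hlen _ hinv
    rw [show ((0 : Nat) : Int) - 1 = -1 by norm_num, PySem.List.pyRange_neg_one_eq_nil (by omega)]
    exact ⟨hlen, fun j => hinv j (Nat.zero_le j)⟩
  | succ c ih =>
    intro adv hlen hc hinv
    rw [show ((c + 1 : Nat) : Int) - 1 = (c : Int) by push_cast; ring,
        PySem.List.pyRange_neg_one_cons (by omega), List.foldl_cons]
    have hkl := kf_le L m
    have hset : PySem.List.pySetD adv (c : Int)
        (PySem.List.pyGetD L (c : Int) false &&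
          (!(PySem.List.pyGetD L ((c : Int) + 1) false) || PySem.List.pyGetD adv ((c : Int) + 1) false))
        = adv.set c (tg L m c) := by
      have h1 : ((c : Int) + 1) = ((c + 1 : Nat) : Int) := by push_cast; ring
      rw [h1]
      simp only [PySem.List.pySetD_natCast, PySem.List.pyGetD_natCast]
      rw [hinv (c + 1) (by omega), tg_rec L m c (by omega)]
    rw [hset]
    exact ih (adv.set c (tg L m c)) (by simp [hlen]) (by omega) (by
      intro j hj
      by_cases hje : j = c
      · subst hje
        simp [List.getD_eq_getElem?_getD, show j < adv.length by omega]
      · have hne : c ≠ j := fun h => hje h.symm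
        rw [List.getD_eq_getElem?_getD]
        simp only [List.getElem?_set, if_neg hne]
        rw [← List.getD_eq_getElem?_getD]
        exact hinv j (by omega))

-- A's intermediate state after the steps m-1 … i have run, described pointwise
def stA (L : List Bool) (m : Int) (i : Nat) (j : Nat) : Bool :=
  if j + 1 < i then L.getD j false
  else if j + 1 = i then (if tg L m j then false else L.getD j false)
  else if tg L m (j - 1) then true
  else if tg L m j then false
  else L.getD j false

theorem stA_lt (L : List Bool) (m : Int) (i j : Nat) (h : j + 1 < i) :
    stA L m i j = L.getD j false := by
  unfold stA; rw [if_pos h]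

theorem stA_eq (L : List Bool) (m : Int) (i j : Nat) (h : j + 1 = i) :
    stA L m i j = (if tg L m j then false else L.getD j false) := by
  unfold stA; rw [if_neg (by omega), if_pos h]

theorem stA_gt (L : List Bool) (m : Int) (i j : Nat) (h : i < j + 1) :
    stA L m i j = (if tg L m (j - 1) then true else if tg L m j then false else L.getD j false) := by
  unfold stA; rw [if_neg (by omega), if_neg (by omega)]

theorem stA_noswap (L : List Bool) (m : Int) (c : Nat) (htc : tg L m c = false) (j : Nat) :
    stA L m (c + 2) j = stA L m (c + 1) j := by
  rcases Nat.lt_trichotomy (j + 1) (c + 1) with h | h | h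
  · rw [stA_lt L m _ j (by omega), stA_lt L m _ j (by omega)]
  · have hj : j = c := by omega
    subst hj
    rw [stA_lt L m _ j (by omega), stA_eq L m _ j (by omega), htc]
    simp
  · by_cases h2 : j = c + 1
    · subst h2
      rw [stA_eq L m _ _ (by omega), stA_gt L m _ _ (by omega),
          show c + 1 - 1 = c by omega, htc]
      simp
    · rw [stA_gt L m _ j (by omega), stA_gt L m _ j (by omega)]

theorem stA_swap (L : List Bool) (m : Int) (c : Nat) (htc : tg L m c = true) (j : Nat) :
    stA L m (c + 1) j = if j = c then false else if j = c + 1 then true else stA L m (c + 2) j := by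
  by_cases h1 : j = c
  · subst h1
    rw [stA_eq L m _ j (by omega), htc]
    simp
  · by_cases h2 : j = c + 1
    · subst h2
      rw [stA_gt L m _ _ (by omega), show c + 1 - 1 = c by omega, htc]
      simp
    · rw [if_neg h1, if_neg h2]
      rcases Nat.lt_trichotomy (j + 1) (c + 1) with h | h | h
      · rw [stA_lt L m _ j (by omega), stA_lt L m _ j (by omega)]
      · omega
      · rw [stA_gt L m _ j (by omega), stA_gt L m _ j (by omega)]

-- evaluate A's nested branch on literal Bool reads
theorem if_cond_eq (a a' t' tc : Bool) (h : tc = (a && (!a' || t'))) (S R : List Bool) :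
    (if (!(if t' = true then false else a')) = true then (if a = true then S else R) else R)
      = (if tc = true then S else R) := by
  subst h; cases a <;> cases a' <;> cases t' <;> simp

-- A's cascading-swap loop, characterised pointwise
theorem A_loop (L : List Bool) (m : Int) (hm : m ≤ (L.length : Int)) :
    ∀ (c : Nat) (R : List Bool), R.length = L.length → (c : Int) ≤ m - 1 →
    (∀ j : Nat, R.getD j false = stA L m (c + 1) j) →
    (((PySem.List.pyRange (c : Int) 0 (-1)).foldl (fun R i =>
        if !(PySem.List.pyGetD R i false) then
          if PySem.List.pyGetD R (i - 1) false then
            PySem.List.pySetD (PySem.List.pySetD R i true) (i - 1) false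
          else R
        else R) R).length = L.length
    ∧ ∀ j : Nat, ((PySem.List.pyRange (c : Int) 0 (-1)).foldl (fun R i =>
        if !(PySem.List.pyGetD R i false) then
          if PySem.List.pyGetD R (i - 1) false then
            PySem.List.pySetD (PySem.List.pySetD R i true) (i - 1) false
          else R
        else R) R).getD j false = stA L m 1 j) := by
  intro c
  induction c with
  | zero =>
    intro R hlen _ hinv
    rw [show ((0 : Nat) : Int) = (0 : Int) by norm_num, PySem.List.pyRange_neg_one_eq_nil (by omega)]
    exact ⟨hlen, fun j => hinv j⟩
  | succ c ih =>
    intro R hlen hc hinv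
    have hc' : (c : Int) + 2 ≤ m := by push_cast at hc; omega
    have hkf : c + 2 ≤ kf L m := by unfold kf; omega
    have hkfl := kf_le L m
    rw [PySem.List.pyRange_neg_one_cons (by push_cast; omega), List.foldl_cons,
        show ((c + 1 : Nat) : Int) - 1 = (c : Int) by push_cast; ring]
    have hRtop : PySem.List.pyGetD R ((c + 1 : Nat) : Int) false
        = (if tg L m (c + 1) = true then false else L.getD (c + 1) false) := by
      rw [PySem.List.pyGetD_natCast, hinv (c + 1), stA_eq L m _ _ (by omega)]
    have hRc : PySem.List.pyGetD R ((c : Nat) : Int) false = L.getD c false := by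
      rw [PySem.List.pyGetD_natCast, hinv c, stA_lt L m _ _ (by omega)]
    have hrec : tg L m c = (L.getD c false && (!(L.getD (c + 1) false) || tg L m (c + 1))) :=
      tg_rec L m c (by omega)
    rw [hRtop, hRc, if_cond_eq _ _ _ _ hrec]
    by_cases htc : tg L m c = true
    · rw [if_pos htc]
      have hsets : PySem.List.pySetD (PySem.List.pySetD R ((c + 1 : Nat) : Int) true) ((c : Nat) : Int) false
          = (R.set (c + 1) true).set c false := by
        rw [PySem.List.pySetD_natCast, PySem.List.pySetD_natCast]
      rw [hsets]
      refine ih _ (by simp [hlen]) (by omega) ?_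
      intro j
      rw [show c + 1 + 1 = c + 2 by omega] at hinv
      rw [stA_swap L m c htc j]
      by_cases h1 : j = c
      · subst h1
        have hj2 : j < R.length := by omega
        simp [List.getD_eq_getElem?_getD, hj2]
      · by_cases h2 : j = c + 1
        · subst h2
          rw [if_neg h1, if_pos rfl, List.getD_eq_getElem?_getD]
          simp only [List.getElem?_set, if_neg (show c ≠ c + 1 by omega)]
          have hcl : c + 1 < R.length := by omega
          rw [if_pos hcl]
          rfl
        · rw [if_neg h1, if_neg h2, List.getD_eq_getElem?_getD]
          simp only [List.getElem?_set, if_neg (show c ≠ j by omega),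
            if_neg (show c + 1 ≠ j by omega)]
          rw [← List.getD_eq_getElem?_getD]
          exact hinv j
    · rw [if_neg htc]
      refine ih R hlen (by omega) ?_
      intro j
      rw [show c + 1 + 1 = c + 2 by omega] at hinv
      exact (hinv j).trans (stA_noswap L m c (by simpa using htc) j)

-- proof-side name for A's final 'R[0] = b' match
def headSet (b : Bool) : List Bool → List Bool
  | [] => []
  | _ :: t => b :: t

theorem pv_assemble (L : List Bool) (b : Bool) (m : Int) (hlpos : 0 < L.length)
    (rA adv : List Bool) (hAl : rA.length = L.length)
    (hAg : ∀ j : Nat, rA.getD j false = stA L m 1 j)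
    (hBl : adv.length = L.length) (hBg : ∀ j : Nat, adv.getD j false = tg L m j) :
    headSet b rA
      = (List.range L.length).map ((fun i : Int =>
          if i = 0 then b
          else if PySem.List.pyGetD adv (i - 1) false then true
          else if PySem.List.pyGetD adv i false then false
          else PySem.List.pyGetD L i false) ∘ (fun k : Nat => (k : Int))) := by
  have hrne : 0 < rA.length := by omega
  obtain ⟨x, t, hxt⟩ := List.exists_cons_of_ne_nil (List.length_pos_iff.mp hrne)
  subst hxt
  unfold headSet
  apply List.ext_getElem
  · simp at hAl ⊢
    omega
  · intro i h1 h2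
    rw [List.getElem_map, List.getElem_range]
    match i, h1 with
    | 0, _ => simp
    | i + 1, h1 =>
      simp only [Function.comp_apply]
      have hni : ¬ (((i + 1 : Nat) : Int) = 0) := by push_cast; omega
      rw [if_neg hni]
      have e1 : ((i + 1 : Nat) : Int) - 1 = ((i : Nat) : Int) := by push_cast; ring
      rw [e1, PySem.List.pyGetD_natCast, PySem.List.pyGetD_natCast, PySem.List.pyGetD_natCast,
          hBg, hBg]
      have hbd : i + 1 < (x :: t).length := by simp at h1 ⊢; omega
      have hL : (x :: t)[i + 1]'hbd = (x :: t).getD (i + 1) false := by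
        rw [List.getD_eq_getElem?_getD, List.getElem?_eq_getElem hbd]
        rfl
      rw [List.getElem_cons_succ, show t[i]'(by simpa using hbd) = (x :: t)[i + 1]'hbd from rfl,
          hL, hAg (i + 1), stA_gt L m 1 (i + 1) (by omega), Nat.add_sub_cancel]

theorem avancer_debut_bloque_eq (L : List Bool) (b : Bool) (m : Int)
    (hne : L ≠ []) (hm : m ≤ (L.length : Int)) :
    avancer_debut_bloque L b m = avancer_debut_bloque_alt L b m := by
  have hlpos : 0 < L.length := List.length_pos_iff.mpr hne
  have hkfl := kf_le L m
  -- characterise A's loop result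
  have hA : ((PySem.List.pyRange (m - 1) 0 (-1)).foldl (fun R i =>
        if !(PySem.List.pyGetD R i false) then
          if PySem.List.pyGetD R (i - 1) false then
            PySem.List.pySetD (PySem.List.pySetD R i true) (i - 1) false
          else R
        else R) L).length = L.length
      ∧ ∀ j : Nat, ((PySem.List.pyRange (m - 1) 0 (-1)).foldl (fun R i =>
        if !(PySem.List.pyGetD R i false) then
          if PySem.List.pyGetD R (i - 1) false then
            PySem.List.pySetD (PySem.List.pySetD R i true) (i - 1) false
          else R
        else R) L).getD j false = stA L m 1 j := by
    by_cases hm2 : m ≤ 1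
    · rw [PySem.List.pyRange_neg_one_eq_nil (by omega)]
      have htg : ∀ j : Nat, tg L m j = false := fun j => tg_top L m j (by unfold kf; omega)
      refine ⟨rfl, fun j => ?_⟩
      match j with
      | 0 => rw [stA_eq L m 1 0 rfl, htg 0]; simp
      | j + 1 => rw [stA_gt L m 1 (j + 1) (by omega), htg, htg]; simp
    · rw [show m - 1 = (((m - 1).toNat : Nat) : Int) by omega]
      refine A_loop L m hm ((m - 1).toNat) L rfl (by omega) ?_
      intro j
      rcases Nat.lt_trichotomy (j + 1) ((m - 1).toNat + 1) with h | h | h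
      · rw [stA_lt L m _ j h]
      · rw [stA_eq L m _ j h, tg_top L m j (by unfold kf; omega)]; simp
      · rw [stA_gt L m _ j h, tg_top L m (j - 1) (by unfold kf; omega),
            tg_top L m j (by unfold kf; omega)]
        simp
  -- characterise B's flag table
  have hrep : ∀ j : Nat, (List.replicate (PySem.List.len L).toNat (false : Bool)).getD j false = false := by
    intro j
    rw [List.getD_eq_getElem?_getD]
    simp only [List.getElem?_replicate]
    split <;> rfl
  have hreplen : (List.replicate (PySem.List.len L).toNat (false : Bool)).length = L.length := by
    simp [PySem.List.len_eq]
  have hB : ((PySem.List.pyRange (max 0 (min m (PySem.List.len L)) - 2) (-1) (-1)).foldl (fun adv j =>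
        PySem.List.pySetD adv j
          (PySem.List.pyGetD L j false &&
            (!(PySem.List.pyGetD L (j + 1) false) || PySem.List.pyGetD adv (j + 1) false)))
      (List.replicate (PySem.List.len L).toNat false)).length = L.length
      ∧ ∀ j : Nat, ((PySem.List.pyRange (max 0 (min m (PySem.List.len L)) - 2) (-1) (-1)).foldl (fun adv j =>
        PySem.List.pySetD adv j
          (PySem.List.pyGetD L j false &&
            (!(PySem.List.pyGetD L (j + 1) false) || PySem.List.pyGetD adv (j + 1) false)))
      (List.replicate (PySem.List.len L).toNat false)).getD j false = tg L m j := by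
    rw [PySem.List.len_eq]
    by_cases hk2 : kf L m ≤ 1
    · rw [PySem.List.pyRange_neg_one_eq_nil (by unfold kf at hk2; omega)]
      refine ⟨by simpa using hreplen, fun j => ?_⟩
      rw [tg_top L m j (by omega)]
      simpa using hrep j
    · rw [show max 0 (min m ((L.length : Int))) - 2 = (((kf L m - 1 : Nat)) : Int) - 1 by unfold kf at hk2 ⊢; omega]
      refine B_loop L m (kf L m - 1) _ (by simpa using hreplen) (by omega) ?_
      intro j hj
      rw [tg_top L m j (by omega)]
      simpa using hrep j
  -- assemble
  obtain ⟨hAl, hAg⟩ := hA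
  obtain ⟨hBl, hBg⟩ := hB
  simp only [avancer_debut_bloque, avancer_debut_bloque_alt]
  rw [PySem.List.foldl_append_singleton_eq_map, List.nil_append]
  simp only [PySem.List.len_eq] at hBl hBg ⊢
  rw [PySem.List.pyRange_zero_natCast, List.map_map]
  exact pv_assemble L b m hlpos _ _ hAl hAg hBl hBg

-- ===== VERDICT (by name: the statement is the Claim_ definition above) =====
theorem avancer_debut_bloque_spec : Claim_equal_avancer_debut_bloque := by
  intro L b m _ hpre
  unfold Spec_avancer_debut_bloque
  rcases hpre with ⟨hne, hle⟩
  rw [PySem.List.len_eq] at hle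
  exact avancer_debut_bloque_eq L b m hne hle
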